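-- pv_equiv track=rewrite | github.com/Tievoo/aed3-uba | Guias/Guia 2/ej1.py | izqDom
-- ===== SOURCE A (Python) =====
-- def izqDom(arr : list) -> bool:
--     if len(arr) == 2:
--         return arr[0] > arr[1];
--
--     middle = len(arr) // 2;
--     left = arr[:middle];
--     right = arr[middle:];
--     if sum(left) > sum(right):
--         return izqDom(left);
--     else:
--         return False;
-- ===== SOURCE B (Python) =====
-- def izqDom(arr : list) -> bool:
--     # prefix sums: P[i] = sum(arr[:i]); then walk the chain of half-lengths iteratively
--     P = [0]
--     for x in arr:
--         P.append(P[-1] + x)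
--     m = len(arr)
--     while m > 2:
--         h = m // 2
--         if 2 * P[h] > P[m]:
--             m = h
--         else:
--             return False
--     return m == 2 and arr[0] > arr[1]
-- ===== Notes on version B (the rewrite author's own statement) =====
-- stated objective: alternative
-- what changed: Replaces the slicing recursion by one prefix-sum pass plus an iterative walk over half-lengths (no list copies, each half test is two O(1) lookups instead of re-summing the slice).
import Mathlib
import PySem

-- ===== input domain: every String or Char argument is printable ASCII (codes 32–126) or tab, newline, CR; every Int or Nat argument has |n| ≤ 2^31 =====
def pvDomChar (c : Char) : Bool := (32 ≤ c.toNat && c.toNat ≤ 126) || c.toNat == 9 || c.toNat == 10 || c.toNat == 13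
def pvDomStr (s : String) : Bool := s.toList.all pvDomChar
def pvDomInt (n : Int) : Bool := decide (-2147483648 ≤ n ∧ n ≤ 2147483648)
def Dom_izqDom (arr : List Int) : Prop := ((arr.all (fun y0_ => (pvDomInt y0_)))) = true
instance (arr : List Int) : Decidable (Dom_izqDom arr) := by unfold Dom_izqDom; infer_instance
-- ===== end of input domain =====

-- B replaces A's slicing recursion by one prefix-sum pass plus an iterative walk over half-lengths (alternative decomposition, no list copies).

-- ===== PORT A =====
def izqDom (arr : List Int) : Bool :=
  if arr.length = 2 then
    -- arr[0], arr[1]: in range under the length guard, so the default is never used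
    decide (PySem.List.pyGetD arr 0 0 > PySem.List.pyGetD arr 1 0)
  else
    let middle : Int := PySem.Int.floordiv (arr.length : Int) 2
    let left := PySem.List.slice arr none (some middle)
    let right := PySem.List.slice arr (some middle) none
    if left.sum > right.sum then izqDom left else false
termination_by arr.length
decreasing_by
  rename_i hlen h
  have hmid : PySem.Int.floordiv ((arr.length : Int)) 2 = ((arr.length / 2 : Nat) : Int) := by
    exact_mod_cast PySem.Int.floordiv_natCast arr.length 2
  simp only [middle, left, right, hmid, PySem.List.slice_to_natCast,
    PySem.List.slice_from_natCast, List.length_take] at h ⊢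
  rcases Nat.eq_zero_or_pos arr.length with h0 | h0
  · have harr : arr = [] := List.eq_nil_of_length_eq_zero h0
    subst harr; simp at h
  · omega

-- ===== PORT B =====
-- P.append(P[-1] + x): P is always nonempty, so the pyGetD default is never used
def pvPrefix (arr : List Int) : List Int :=
  arr.foldl (fun P x => P ++ [PySem.List.pyGetD P (-1) 0 + x]) [0]

def izqDomLoop (arr : List Int) (P : List Int) (m : Nat) : Bool :=
  if m > 2 then
    let h := m / 2
    if 2 * PySem.List.pyGetD P (h : Int) 0 > PySem.List.pyGetD P (m : Int) 0 then
      izqDomLoop arr P h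
    else false
  else
    decide (m = 2) && decide (PySem.List.pyGetD arr 0 0 > PySem.List.pyGetD arr 1 0)
termination_by m
decreasing_by omega

def izqDom_alt (arr : List Int) : Bool :=
  izqDomLoop arr (pvPrefix arr) arr.length

-- ===== PRECONDITION & SPEC =====
def Spec_izqDom (arr : List Int) (out : Bool) : Prop := out = izqDom_alt arr
instance (arr : List Int) (out : Bool) : Decidable (Spec_izqDom arr out) := by unfold Spec_izqDom; infer_instance

-- ===== CLAIM (what is proved, stated in full; the proofs are below) =====
def Claim_equal_izqDom : Prop := ∀ (arr : List Int), Dom_izqDom arr → Spec_izqDom arr (izqDom arr)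

-- ===== LEMMAS AND PROOFS =====

-- pvPrefix really is the table of prefix sums
theorem pvPrefix_eq (arr : List Int) :
    pvPrefix arr = (List.range (arr.length + 1)).map (fun i => (arr.take i).sum) := by
  induction arr using List.reverseRecOn with
  | nil => simp [pvPrefix]
  | append_singleton xs x ih =>
    have hstep : pvPrefix (xs ++ [x])
        = pvPrefix xs ++ [PySem.List.pyGetD (pvPrefix xs) (-1) 0 + x] := by
      simp [pvPrefix]
    have hsplit : pvPrefix xs
        = (List.range xs.length).map (fun i => (xs.take i).sum) ++ [(xs.take xs.length).sum] := by
      rw [ih, List.range_succ, List.map_append, List.map_singleton]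
    have hlast : PySem.List.pyGetD (pvPrefix xs) (-1) 0 = (xs.take xs.length).sum := by
      rw [hsplit]; exact PySem.List.pyGetD_neg_one_append_singleton _ _ _
    rw [hstep, hlast, ih]
    have hlen : (xs ++ [x]).length = xs.length + 1 := by simp
    conv_rhs => rw [hlen, List.range_succ, List.map_append, List.map_singleton]
    congr 1
    · apply List.map_congr_left
      intro i hi
      rw [List.mem_range] at hi
      rw [List.take_append_of_le_length (by omega)]
    · simp

theorem pvPrefix_get (arr : List Int) (i : Nat) (hi : i ≤ arr.length) :
    PySem.List.pyGetD (pvPrefix arr) (i : Int) 0 = (arr.take i).sum := by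
  rw [pvPrefix_eq]
  simp [List.getD, Nat.lt_succ_of_le hi]

-- unfolding lemmas for A's port
theorem izqDom_two (l : List Int) (h : l.length = 2) :
    izqDom l = decide (PySem.List.pyGetD l 0 0 > PySem.List.pyGetD l 1 0) := by
  rw [izqDom, if_pos h]

theorem izqDom_step (l : List Int) (hne : ¬ l.length = 2) :
    izqDom l = if (l.take (l.length / 2)).sum > (l.drop (l.length / 2)).sum then
        izqDom (l.take (l.length / 2)) else false := by
  conv_lhs => rw [izqDom]
  rw [if_neg hne]
  have hmid : PySem.Int.floordiv ((l.length : Int)) 2 = ((l.length / 2 : Nat) : Int) := by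
    exact_mod_cast PySem.Int.floordiv_natCast l.length 2
  simp only [hmid, PySem.List.slice_to_natCast, PySem.List.slice_from_natCast]

theorem izqDom_nil : izqDom [] = false := by
  rw [izqDom_step [] (by simp)]
  simp

theorem izqDom_small (l : List Int) (hl : l.length ≤ 1) : izqDom l = false := by
  match l with
  | [] => exact izqDom_nil
  | [a] =>
    rw [izqDom_step [a] (by simp)]
    simp [izqDom_nil]
  | _ :: _ :: _ => simp at hl

theorem loop_eq (arr : List Int) : ∀ m, m ≤ arr.length →
    izqDomLoop arr (pvPrefix arr) m = izqDom (arr.take m) := by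
  intro m
  induction m using Nat.strong_induction_on with
  | _ m ih =>
    intro hm
    have hlen : (arr.take m).length = m := by simp [Nat.min_eq_left hm]
    rw [izqDomLoop]
    by_cases h3 : m > 2
    · rw [if_pos h3]
      have hh : m / 2 ≤ arr.length := le_trans (Nat.div_le_self m 2) hm
      simp only [pvPrefix_get arr (m / 2) hh, pvPrefix_get arr m hm]
      rw [izqDom_step (arr.take m) (by omega), hlen]
      have htt : (arr.take m).take (m / 2) = arr.take (m / 2) := by
        rw [List.take_take, Nat.min_eq_left (Nat.div_le_self m 2)]
      have hsd : ((arr.take m).take (m / 2)).sum + ((arr.take m).drop (m / 2)).sum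
          = (arr.take m).sum := List.sum_take_add_sum_drop _ _
      rw [htt] at hsd ⊢
      have hcond : (2 * (arr.take (m / 2)).sum > (arr.take m).sum)
          ↔ ((arr.take (m / 2)).sum > ((arr.take m).drop (m / 2)).sum) := by omega
      by_cases hc : 2 * (arr.take (m / 2)).sum > (arr.take m).sum
      · rw [if_pos hc, if_pos (hcond.mp hc)]
        exact ih (m / 2) (Nat.div_lt_self (by omega) (by omega)) hh
      · rw [if_neg hc, if_neg (fun hb => hc (hcond.mpr hb))]
    · rw [if_neg h3]
      by_cases h2 : m = 2
      · subst h2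
        rw [izqDom_two (arr.take 2) hlen]
        match arr, hm with
        | a :: b :: t, _ =>
          have h0 : (0 : Int) ≤ (t.length : Int) + 1 := by positivity
          simp [PySem.List.pyGetD, PySem.List.pyGet?, PySem.List.pyIdx?, h0]
      · have : m ≤ 1 := by omega
        rw [izqDom_small (arr.take m) (by omega)]
        simp [h2]

-- ===== VERDICT (by name: the statement is the Claim_ definition above) =====
theorem izqDom_spec : Claim_equal_izqDom := by
  intro arr _
  unfold Spec_izqDom izqDom_alt
  rw [loop_eq arr arr.length le_rfl, List.take_length]
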